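-- pv_equiv track=rewrite | github.com/varvarakoshman/algorithms_workout_python | algoExpert/medium/BestSeat.py | bestSeat
-- ===== SOURCE A (Python) =====
-- def bestSeat(seats):
--     start_idx, optimal_idx = -1, -1
--     max_space = 0
--     curr_idx = 0
--     while curr_idx < len(seats):
--         if seats[curr_idx] != 0 and start_idx != -1:
--             available_space = curr_idx - start_idx
--             if available_space > max_space:
--                 max_space = available_space
--                 middle = (curr_idx - start_idx) // 2
--                 optimal_idx = start_idx + middle if available_space % 2 == 1 else start_idx + middle - 1
--             start_idx = -1
--         elif seats[curr_idx] == 0 and start_idx == -1: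
--             start_idx = curr_idx
--         curr_idx += 1
--     return optimal_idx
-- ===== SOURCE B (Python) =====
-- def bestSeat(seats):
--     occ = [-1] + [i for i, s in enumerate(seats) if s != 0]
--     best_gap, best_idx = 0, -1
--     for a, b in zip(occ, occ[1:]):
--         gap = b - a - 1
--         if gap > best_gap:
--             best_gap, best_idx = gap, (a + b) // 2
--     return best_idx
-- ===== Notes on version B (the rewrite author's own statement) =====
-- stated objective: alternative
-- what changed: Instead of a stateful while-loop tracking the start of the current empty run and placing the middle via an odd/even offset correction, B first collects the occupied-seat indices (prefixed with a virtual -1), then scans consecutive occupied pairs, keeping the center (a+b)//2 of the widest strict gap.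
import Mathlib
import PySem

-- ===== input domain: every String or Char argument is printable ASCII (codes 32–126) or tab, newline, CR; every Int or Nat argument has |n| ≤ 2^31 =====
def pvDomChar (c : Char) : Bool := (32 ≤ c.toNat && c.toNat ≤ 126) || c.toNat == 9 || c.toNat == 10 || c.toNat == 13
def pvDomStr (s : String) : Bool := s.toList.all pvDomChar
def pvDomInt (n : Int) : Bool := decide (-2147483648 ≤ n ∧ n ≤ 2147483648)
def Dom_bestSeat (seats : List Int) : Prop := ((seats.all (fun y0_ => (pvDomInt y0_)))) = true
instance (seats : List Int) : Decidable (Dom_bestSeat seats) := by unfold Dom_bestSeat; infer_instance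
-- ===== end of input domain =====

-- B replaces A's stateful run-start/while-loop scan by collecting occupied indices
-- (prefixed with a virtual -1) and scanning consecutive occupied pairs, keeping
-- the center (a+b)//2 of the widest gap (objective: alternative decomposition).

-- ===== PORT A =====
-- the while loop, transcribed as structural recursion over the remaining seats,
-- carrying curr_idx / start_idx / optimal_idx / max_space
def bestSeatGo : List Int → Int → Int → Int → Int → Int
  | [], _, _, optimalIdx, _ => optimalIdx
  | v :: rest, currIdx, startIdx, optimalIdx, maxSpace =>
    if v ≠ 0 ∧ startIdx ≠ -1 then
      let availableSpace := currIdx - startIdx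
      if availableSpace > maxSpace then
        let middle := PySem.Int.floordiv (currIdx - startIdx) 2
        bestSeatGo rest (currIdx + 1) (-1)
          (if PySem.Int.mod availableSpace 2 = 1 then startIdx + middle else startIdx + middle - 1)
          availableSpace
      else bestSeatGo rest (currIdx + 1) (-1) optimalIdx maxSpace
    else if v = 0 ∧ startIdx = -1 then
      bestSeatGo rest (currIdx + 1) currIdx optimalIdx maxSpace
    else
      bestSeatGo rest (currIdx + 1) startIdx optimalIdx maxSpace

def bestSeat (seats : List Int) : Int := bestSeatGo seats 0 (-1) (-1) 0

-- ===== PORT B =====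
-- one step of B's loop body over a pair (a, b)
def bsPairStep (s : Int × Int) (p : Int × Int) : Int × Int :=
  let gap := p.2 - p.1 - 1
  if gap > s.1 then (gap, PySem.Int.floordiv (p.1 + p.2) 2) else s

def bestSeat_alt (seats : List Int) : Int :=
  let occ : List Int :=
    -1 :: ((PySem.List.enumerate seats).filter (fun p => p.2 ≠ 0)).map (·.1)
  let st := (occ.zip occ.tail).foldl bsPairStep (0, -1)
  st.2

-- ===== PRECONDITION & SPEC =====
def Spec_bestSeat (seats : List Int) (out : Int) : Prop := out = bestSeat_alt seats
instance (seats : List Int) (out : Int) : Decidable (Spec_bestSeat seats out) := by unfold Spec_bestSeat; infer_instance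

-- ===== CLAIM (what is proved, stated in full; the proofs are below) =====
def Claim_equal_bestSeat : Prop := ∀ (seats : List Int), Dom_bestSeat seats → Spec_bestSeat seats (bestSeat seats)

-- ===== LEMMAS AND PROOFS =====

-- occupied indices of the remaining seats, starting at index i
def bsOcc : List Int → Int → List Int
  | [], _ => []
  | v :: rest, i => if v ≠ 0 then i :: bsOcc rest (i + 1) else bsOcc rest (i + 1)

-- folding bsPairStep over consecutive pairs, with a the previous occupied index
def bsPairFold : List Int → Int → Int × Int → Int × Int
  | [], _, s => s
  | b :: rest, a, s => bsPairFold rest b (bsPairStep s (a, b))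

theorem bsOcc_enumerate (seats : List Int) : ∀ (i : Int),
    ((PySem.List.enumerate seats i).filter (fun p => p.2 ≠ 0)).map (·.1) = bsOcc seats i := by
  induction seats with
  | nil => intro i; simp [PySem.List.enumerate_nil, bsOcc]
  | cons v rest ih =>
    intro i
    simp only [PySem.List.enumerate_cons, List.filter_cons, bsOcc]
    by_cases hv : v = 0 <;> simp [hv] <;> simpa using ih (i + 1)

theorem zip_foldl_eq_pairFold : ∀ (occ : List Int) (a : Int) (s : Int × Int),
    ((a :: occ).zip occ).foldl bsPairStep s = bsPairFold occ a s := by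
  intro occ
  induction occ with
  | nil => intro a s; rfl
  | cons b rest ih => intro a s; simpa [List.zip, bsPairFold] using ih b (bsPairStep s (a, b))

theorem bs_middle_eq (a i : Int) (_ha : -1 ≤ a) (_hlt : a + 1 < i) :
    (if PySem.Int.mod (i - (a + 1)) 2 = 1
      then a + 1 + PySem.Int.floordiv (i - (a + 1)) 2
      else a + 1 + PySem.Int.floordiv (i - (a + 1)) 2 - 1)
      = PySem.Int.floordiv (a + i) 2 := by
  rw [PySem.Int.mod_eq_emod_of_pos (a := i - (a + 1)) (b := 2) (by omega),
      PySem.Int.floordiv_eq_ediv_of_pos (a := i - (a + 1)) (b := 2) (by omega),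
      PySem.Int.floordiv_eq_ediv_of_pos (a := a + i) (b := 2) (by omega)]
  split <;> omega

-- the main invariant: A's loop state corresponds to B's pair fold, where a is the
-- last occupied index seen so far (or -1) and A's start_idx is a+1 iff an empty
-- run is open (i.e. curr_idx > a + 1), otherwise -1
theorem bs_main (rest : List Int) : ∀ (i a g o : Int), -1 ≤ a → a < i → 0 ≤ g →
    bestSeatGo rest i (if i = a + 1 then -1 else a + 1) o g
      = (bsPairFold (bsOcc rest i) a (g, o)).2 := by
  induction rest with
  | nil => intro i a g o _ _ _; simp [bestSeatGo, bsOcc, bsPairFold]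
  | cons v rest ih =>
    intro i a g o ha hai hg
    by_cases hv : v = 0
    · -- seat empty: B's occ list skips it; A opens (or keeps) the run
      subst hv
      by_cases hi : i = a + 1
      · -- start_idx = -1: A sets start_idx := curr_idx = a + 1
        simp only [hi, bestSeatGo, bsOcc]
        rw [if_neg (by simp), if_pos (by simp)]
        have := ih (a + 1 + 1) a g o ha (by omega) hg
        rw [if_neg (by omega)] at this
        simpa using this
      · -- run already open: state unchanged
        simp only [if_neg hi, bestSeatGo, bsOcc]
        rw [if_neg (by omega), if_neg (by omega)]
        have := ih (i + 1) a g o ha (by omega) hg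
        rw [if_neg (by omega)] at this
        simpa using this
    · -- seat occupied: B processes the pair (a, i); gap = i - a - 1
      simp only [bsOcc, if_pos hv, bsPairFold]
      by_cases hi : i = a + 1
      · -- no open run: A leaves state unchanged; B's gap is 0, not > g
        have hstep : bsPairStep (g, o) (a, i) = (g, o) := by
          simp only [bsPairStep]; rw [if_neg (by simp; omega)]
        rw [hstep, if_pos hi]
        simp only [bestSeatGo]
        rw [if_neg (by simp), if_neg (by simp [hv])]
        have := ih (i + 1) i g o (by omega) (by omega) hg
        rw [if_pos rfl] at this
        exact this
      · -- open run ends at i: available_space = i - (a+1) = gap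
        have hrun : a + 1 < i := by omega
        rw [if_neg hi]
        simp only [bestSeatGo]
        rw [if_pos (by constructor; exact hv; omega)]
        by_cases hgap : i - (a + 1) > g
        · rw [if_pos hgap]
          have hstep : bsPairStep (g, o) (a, i)
              = (i - a - 1, PySem.Int.floordiv (a + i) 2) := by
            simp only [bsPairStep]; rw [if_pos (by simp; omega)]
          rw [hstep]
          have := ih (i + 1) i (i - a - 1) (PySem.Int.floordiv (a + i) 2)
            (by omega) (by omega) (by omega)
          rw [if_pos rfl] at this
          rw [bs_middle_eq a i ha hrun]
          have heq : i - (a + 1) = i - a - 1 := by ring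
          rw [heq]
          exact this
        · rw [if_neg hgap]
          have hstep : bsPairStep (g, o) (a, i) = (g, o) := by
            simp only [bsPairStep]; rw [if_neg (by simp; omega)]
          rw [hstep]
          have := ih (i + 1) i g o (by omega) (by omega) hg
          rw [if_pos rfl] at this
          exact this

-- ===== VERDICT (by name: the statement is the Claim_ definition above) =====
theorem bestSeat_spec : Claim_equal_bestSeat := by
  intro seats _
  show bestSeat seats = bestSeat_alt seats
  have h := bs_main seats 0 (-1) 0 (-1) (by omega) (by omega) (by omega)
  rw [if_pos (by omega)] at h
  simp only [bestSeat, bestSeat_alt, List.tail_cons, zip_foldl_eq_pairFold,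
    bsOcc_enumerate]
  simpa using h
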